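-- pv_equiv track=rewrite | github.com/entity12208/GeoPoliticalDomination | bot_playstyles.py | evaluate_continent_completion
-- ===== SOURCE A (Python) =====
-- from collections import defaultdict
--
-- def evaluate_continent_completion(gs, me_name):
--     cont_map = defaultdict(lambda: {"total":0, "owned":0})
--     for p in gs.get("pins", []):
--         cont = p.get("continent", "") or ""
--         cont_map[cont]["total"] += 1
--         if p.get("owner") == me_name:
--             cont_map[cont]["owned"] += 1
--     return cont_map
-- ===== SOURCE B (Python) =====
-- from collections import defaultdict
--
-- def evaluate_continent_completion(gs, me_name):
--     # Group pins by continent first, then count each group in one shot.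
--     groups = {}
--     for p in gs.get("pins", []):
--         groups.setdefault(p.get("continent", "") or "", []).append(p)
--     result = defaultdict(lambda: {"total": 0, "owned": 0})
--     for cont, pins in groups.items():
--         result[cont] = {"total": len(pins),
--                         "owned": sum(1 for q in pins if q.get("owner") == me_name)}
--     return result
-- ===== Notes on version B (the rewrite author's own statement) =====
-- stated objective: alternative
-- what changed: Replaces the single-pass defaultdict mutation (increment total/owned per pin) with a group-then-count decomposition: one pass groups pins by normalized continent, a second pass maps each group to its total/owned counts.
import Mathlib
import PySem

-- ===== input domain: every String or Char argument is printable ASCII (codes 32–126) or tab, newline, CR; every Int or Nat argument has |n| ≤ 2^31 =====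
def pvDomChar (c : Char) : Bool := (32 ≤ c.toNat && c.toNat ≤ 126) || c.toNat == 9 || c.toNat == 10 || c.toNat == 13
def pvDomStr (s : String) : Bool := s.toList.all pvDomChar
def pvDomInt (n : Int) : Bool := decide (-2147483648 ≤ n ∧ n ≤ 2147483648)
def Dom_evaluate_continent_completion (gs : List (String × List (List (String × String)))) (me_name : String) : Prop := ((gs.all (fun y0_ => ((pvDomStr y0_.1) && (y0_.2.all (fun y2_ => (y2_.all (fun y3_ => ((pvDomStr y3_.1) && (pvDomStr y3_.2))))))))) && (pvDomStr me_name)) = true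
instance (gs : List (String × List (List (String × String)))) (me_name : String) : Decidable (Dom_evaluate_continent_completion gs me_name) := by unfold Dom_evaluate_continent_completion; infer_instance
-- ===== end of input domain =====

-- B groups pins by continent first, then counts each group; same return value as A's
-- per-pin defaultdict mutation (equivalence is about the return value; neither mutates its input).

-- shared helper: first-match lookup in an association list (dict.get)
def pvGet? : List (String × String) → String → Option String
  | [], _ => none
  | (k, v) :: rest, key => if k = key then some v else pvGet? rest key

-- shared helper: gs.get("pins", [])
def pvPins : List (String × List (List (String × String))) → List (List (String × String))
  | [] => []
  | (k, v) :: rest => if k = "pins" then v else pvPins rest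

-- shared helper: p.get("continent", "") or ""  (identical expression in both Pythons)
def pvCont (p : List (String × String)) : String :=
  let c := (pvGet? p "continent").getD ""
  if c = "" then "" else c

-- ===== PORT A =====
-- defaultdict access: make sure key cont is present (append zero entry if missing)
def pvEnsure : List (String × List (String × Int)) → String → List (String × List (String × Int))
  | [], c => [(c, [("total", 0), ("owned", 0)])]
  | e :: rest, c => if e.1 = c then e :: rest else e :: pvEnsure rest c

def pvIncInner : List (String × Int) → String → List (String × Int)
  | [], _ => []
  | kv :: rest, f => if kv.1 = f then (kv.1, kv.2 + 1) :: rest else kv :: pvIncInner rest f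

-- cont_map[cont][f] += 1  (first-match update; dict keys are unique)
def pvIncField : List (String × List (String × Int)) → String → String → List (String × List (String × Int))
  | [], _, _ => []
  | e :: rest, c, f => if e.1 = c then (e.1, pvIncInner e.2 f) :: rest else e :: pvIncField rest c f

def pvStepA (me_name : String) (m : List (String × List (String × Int))) (p : List (String × String)) :
    List (String × List (String × Int)) :=
  let cont := pvCont p
  let m1 := pvIncField (pvEnsure m cont) cont "total"
  if pvGet? p "owner" = some me_name then pvIncField (pvEnsure m1 cont) cont "owned" else m1

def evaluate_continent_completion (gs : List (String × List (List (String × String)))) (me_name : String) : List (String × List (String × Int)) :=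
  (pvPins gs).foldl (pvStepA me_name) []

-- ===== PORT B =====
-- groups.setdefault(cont, []).append(p)
def pvGroupAdd : List (String × List (List (String × String))) → String → List (String × String) → List (String × List (List (String × String)))
  | [], c, p => [(c, [p])]
  | e :: rest, c, p => if e.1 = c then (e.1, e.2 ++ [p]) :: rest else e :: pvGroupAdd rest c p

def evaluate_continent_completion_alt (gs : List (String × List (List (String × String)))) (me_name : String) : List (String × List (String × Int)) :=
  let groups := (pvPins gs).foldl (fun g p => pvGroupAdd g (pvCont p) p) []
  groups.map (fun e =>
    (e.1, [("total", (e.2.length : Int)),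
           ("owned", ((e.2.countP (fun q => pvGet? q "owner" == some me_name) : Nat) : Int))]))

-- ===== PRECONDITION & SPEC =====
def Spec_evaluate_continent_completion (gs : List (String × List (List (String × String)))) (me_name : String) (out : List (String × List (String × Int))) : Prop := out = evaluate_continent_completion_alt gs me_name
instance (gs : List (String × List (List (String × String)))) (me_name : String) (out : List (String × List (String × Int))) : Decidable (Spec_evaluate_continent_completion gs me_name out) := by unfold Spec_evaluate_continent_completion; infer_instance

-- ===== CLAIM (what is proved, stated in full; the proofs are below) =====
def Claim_equal_evaluate_continent_completion : Prop := ∀ (gs : List (String × List (List (String × String)))) (me_name : String), Dom_evaluate_continent_completion gs me_name → Spec_evaluate_continent_completion gs me_name (evaluate_continent_completion gs me_name)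

-- ===== LEMMAS AND PROOFS =====

def pvRender (me_name : String) (g : List (String × List (List (String × String)))) :
    List (String × List (String × Int)) :=
  g.map (fun e =>
    (e.1, [("total", (e.2.length : Int)),
           ("owned", ((e.2.countP (fun q => pvGet? q "owner" == some me_name) : Nat) : Int))]))

theorem pvStepA_render (me_name : String) (p : List (String × String))
    (g : List (String × List (List (String × String)))) :
    pvStepA me_name (pvRender me_name g) p = pvRender me_name (pvGroupAdd g (pvCont p) p) := by
  by_cases hp : pvGet? p "owner" = some me_name <;>
  · induction g with
    | nil =>
        simp [pvStepA, pvRender, pvGroupAdd, pvEnsure, pvIncField, pvIncInner, hp]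
    | cons e rest ih =>
        by_cases he : e.1 = pvCont p
        · simp [pvStepA, pvRender, pvEnsure, pvIncField, pvIncInner, pvGroupAdd, he, hp,
                List.countP_append]
        · simp only [pvStepA, hp] at ih
          simp [pvStepA, pvRender, pvEnsure, pvIncField, pvGroupAdd, he, hp] at ih ⊢
          exact ih

theorem pv_foldl_render (me_name : String) (pins : List (List (String × String))) :
    ∀ g : List (String × List (List (String × String))),
      pins.foldl (pvStepA me_name) (pvRender me_name g)
        = pvRender me_name (pins.foldl (fun g p => pvGroupAdd g (pvCont p) p) g) := by
  induction pins with
  | nil => intro g; simp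
  | cons p rest ih =>
      intro g
      simp only [List.foldl_cons, pvStepA_render]
      exact ih _

-- ===== VERDICT (by name: the statement is the Claim_ definition above) =====
theorem evaluate_continent_completion_spec : Claim_equal_evaluate_continent_completion := by
  intro gs me_name _
  unfold Spec_evaluate_continent_completion
  unfold evaluate_continent_completion evaluate_continent_completion_alt
  have h := pv_foldl_render me_name (pvPins gs) []
  simpa [pvRender] using h
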